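-- pv_equiv track=rewrite | github.com/MrBrantCode/unitest_baseline | mut_generate/mist_train_taco/taco_5525/solution.py | generate_pattern
-- ===== SOURCE A (Python) =====
-- def generate_pattern(n: int) -> list[str]:
--     pattern = []
--     for i in range(n):
--         row = ''
--         num = 0
--
--         # Add leading spaces
--         for j in range(n - i - 1):
--             row += ' '
--
--         # Add ascending characters
--         for j in range(i + 1):
--             row += chr(65 + num)
--             num += 1
--
--         # Add descending characters
--         p = num - 2
--         for j in range(i):
--             row += chr(65 + p)
--             p -= 1
--
--         pattern.append(row)
--
--     return pattern
-- ===== SOURCE B (Python) =====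
-- def generate_pattern(n: int) -> list[str]:
--     pattern = []
--     for i in range(n):
--         ascending = ''.join(chr(65 + k) for k in range(i + 1))
--         pattern.append(' ' * (n - i - 1) + ascending + ascending[-2::-1])
--     return pattern
-- ===== Notes on version B (the rewrite author's own statement) =====
-- stated objective: simpler
-- what changed: Each row is built as leading spaces plus the ascending half plus its mirror (ascending[-2::-1]), eliminating A's separate descending loop, its decrementing counter and the character-by-character space loop.
import Mathlib
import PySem

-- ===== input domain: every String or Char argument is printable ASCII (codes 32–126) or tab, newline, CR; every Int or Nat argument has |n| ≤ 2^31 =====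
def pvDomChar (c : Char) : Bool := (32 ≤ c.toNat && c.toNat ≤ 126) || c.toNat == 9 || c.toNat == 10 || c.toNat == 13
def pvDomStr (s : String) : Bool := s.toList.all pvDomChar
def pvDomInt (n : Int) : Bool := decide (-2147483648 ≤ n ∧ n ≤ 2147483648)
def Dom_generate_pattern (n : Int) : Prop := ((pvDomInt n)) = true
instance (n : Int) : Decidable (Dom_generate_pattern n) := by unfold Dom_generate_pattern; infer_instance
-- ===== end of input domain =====

-- B builds each row as spaces ++ ascending half ++ its mirror, replacing A's three
-- character-by-character loops (objective: simpler).  chr(65+k) is ported as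
-- Char.ofNat, exact outside the surrogate range (reached only for n ≥ 55224).

-- ===== PORT A =====
def generate_pattern (n : Int) : List String :=
  (PySem.List.pyRange 0 n 1).foldl (fun pattern i =>
    let row : String := ""
    let num : Int := 0
    -- add leading spaces
    let row := (PySem.List.pyRange 0 (n - i - 1) 1).foldl (fun r _ => r.push ' ') row
    -- add ascending characters
    let s := (PySem.List.pyRange 0 (i + 1) 1).foldl
      (fun (s : String × Int) _ => (s.1.push (Char.ofNat (65 + s.2).toNat), s.2 + 1)) (row, num)
    -- add descending characters
    let p : Int := s.2 - 2
    let t := (PySem.List.pyRange 0 i 1).foldl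
      (fun (s : String × Int) _ => (s.1.push (Char.ofNat (65 + s.2).toNat), s.2 - 1)) (s.1, p)
    pattern ++ [t.1]) []

-- ===== PORT B =====
def generate_pattern_alt (n : Int) : List String :=
  (PySem.List.pyRange 0 n 1).map (fun i =>
    let asc : List Char := (PySem.List.pyRange 0 (i + 1) 1).map (fun k => Char.ofNat (65 + k).toNat)
    -- asc.dropLast.reverse is the exact value of Python's asc[-2::-1] (all but the peak, reversed)
    String.ofList (List.replicate (n - i - 1).toNat ' ' ++ asc ++ asc.dropLast.reverse))

-- ===== PRECONDITION & SPEC =====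
def Spec_generate_pattern (n : Int) (out : List String) : Prop := out = generate_pattern_alt n
instance (n : Int) (out : List String) : Decidable (Spec_generate_pattern n out) := by unfold Spec_generate_pattern; infer_instance

-- ===== CLAIM (what is proved, stated in full; the proofs are below) =====
def Claim_equal_generate_pattern : Prop := ∀ (n : Int), Dom_generate_pattern n → Spec_generate_pattern n (generate_pattern n)

-- ===== LEMMAS AND PROOFS =====

-- a foldl whose body ignores the list element is an iterate
theorem pv_foldl_const {α β : Type} (g : β → β) (l : List α) (init : β) :
    l.foldl (fun s _ => g s) init = g^[l.length] init := by
  induction l generalizing init with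
  | nil => rfl
  | cons x xs ih => simp [List.foldl_cons, ih, Function.iterate_succ_apply]

-- append-one-at-a-time accumulation is a map
theorem pv_foldl_snoc {α β : Type} (f : α → β) (l : List α) (acc : List β) :
    l.foldl (fun a x => a ++ [f x]) acc = acc ++ l.map f := by
  induction l generalizing acc with
  | nil => simp
  | cons x xs ih => simp [ih]

theorem pv_spaces_iter (m : Nat) (r : String) :
    (fun (s : String) => s.push ' ')^[m] r = r ++ String.ofList (List.replicate m ' ') := by
  induction m generalizing r with
  | zero => rw [← String.toList_inj]; simp
  | succ m ih =>
    rw [Function.iterate_succ_apply, ih, ← String.toList_inj]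
    simp [List.replicate_succ]

theorem pv_asc_iter (m : Nat) (r : String) (a : Int) :
    (fun (s : String × Int) => (s.1.push (Char.ofNat (65 + s.2).toNat), s.2 + 1))^[m] (r, a)
      = (r ++ String.ofList ((List.range m).map (fun k : Nat => Char.ofNat (65 + a + (k : Int)).toNat)), a + m) := by
  induction m generalizing r a with
  | zero => refine Prod.ext ?_ (by simp)
            rw [← String.toList_inj]; simp
  | succ m ih =>
    rw [Function.iterate_succ_apply]
    simp only []
    rw [ih]
    refine Prod.ext ?_ (by simp; ring)
    rw [← String.toList_inj]
    simp only [String.toList_append, String.toList_ofList, String.toList_push,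
      List.range_succ_eq_map, List.map_cons, List.map_map, Function.comp_def, List.append_assoc]
    rw [List.singleton_append]
    congr 1
    refine List.cons_eq_cons.mpr ⟨by congr 1; norm_num, ?_⟩
    apply List.map_congr_left; intro k _; congr 1; push_cast; omega

theorem pv_desc_iter (m : Nat) (r : String) (q : Int) :
    (fun (s : String × Int) => (s.1.push (Char.ofNat (65 + s.2).toNat), s.2 - 1))^[m] (r, q)
      = (r ++ String.ofList ((List.range m).map (fun k : Nat => Char.ofNat (65 + q - (k : Int)).toNat)), q - m) := by
  induction m generalizing r q with
  | zero => refine Prod.ext ?_ (by simp)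
            rw [← String.toList_inj]; simp
  | succ m ih =>
    rw [Function.iterate_succ_apply]
    simp only []
    rw [ih]
    refine Prod.ext ?_ (by simp; ring)
    rw [← String.toList_inj]
    simp only [String.toList_append, String.toList_ofList, String.toList_push,
      List.range_succ_eq_map, List.map_cons, List.map_map, Function.comp_def, List.append_assoc]
    rw [List.singleton_append]
    congr 1
    refine List.cons_eq_cons.mpr ⟨by congr 1; norm_num, ?_⟩
    apply List.map_congr_left; intro k _; congr 1; omega

-- the descending half is the mirror of the ascending half minus its last element
theorem pv_desc_eq_mirror (m : Nat) :
    (List.range m).map (fun k : Nat => Char.ofNat (65 + ((m : Int) - 1) - (k : Int)).toNat)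
      = (((List.range (m + 1)).map (fun k : Nat => Char.ofNat (65 + (k : Int)).toNat)).dropLast).reverse := by
  rw [List.range_succ, List.map_append, List.map_singleton, List.dropLast_concat]
  apply List.ext_getElem
  · simp
  · intro j h1 h2
    simp only [List.getElem_map, List.getElem_range, List.getElem_reverse, List.length_map,
      List.length_range]
    have hj : j < m := by simpa using h1
    congr 2
    omega

theorem generate_pattern_rows (n : Int) :
    generate_pattern n = generate_pattern_alt n := by
  unfold generate_pattern generate_pattern_alt
  rw [pv_foldl_snoc]
  rw [List.nil_append]
  apply List.map_congr_left
  intro i hi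
  have h0i : 0 ≤ i := ((PySem.List.mem_pyRange_one).mp hi).1
  obtain ⟨m, rfl⟩ : ∃ m : Nat, i = (m : Int) := ⟨i.toNat, (Int.toNat_of_nonneg h0i).symm⟩
  simp only [pv_foldl_const, PySem.List.length_pyRange_one]
  rw [pv_spaces_iter, pv_asc_iter, pv_desc_iter]
  have hm1 : ((m : Int) + 1 - 0).toNat = m + 1 := by omega
  have hm0 : ((m : Int) - 0).toNat = m := by omega
  rw [hm1, hm0]
  have hnum : (0 : Int) + ((m + 1 : Nat) : Int) - 2 = (m : Int) - 1 := by push_cast; ring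
  rw [hnum]
  rw [PySem.List.pyRange_one 0 ((m : Int) + 1)]
  rw [hm1, ← String.toList_inj]
  simp only [String.toList_append, String.toList_ofList, String.toList_empty, List.nil_append,
    List.map_map, Function.comp_def, List.append_assoc, zero_add, add_zero, sub_zero]
  congr 2
  exact pv_desc_eq_mirror m

-- ===== VERDICT (by name: the statement is the Claim_ definition above) =====
theorem generate_pattern_spec : Claim_equal_generate_pattern := by
  intro n _
  exact generate_pattern_rows n
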